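-- pv_equiv track=rewrite | github.com/delatorrecj/orc | backend/header_mapper.py | apply_mapping
-- ===== SOURCE A (Python) =====
-- from typing import Dict, List, Optional, Any
--
-- def apply_mapping(mapping: Dict[str, str], headers: List[str], rows: List[List[str]]) -> List[Dict[str, Any]]:
--     """
--     Apply column mapping to convert raw rows to standardized objects.
--     """
--     # Create header index lookup
--     header_to_idx = {h: i for i, h in enumerate(headers)}
--
--     result = []
--     for row in rows:
--         item = {}
--         for field, header in mapping.items():
--             if header and header in header_to_idx:
--                 idx = header_to_idx[header]
--                 if idx < len(row):
--                     item[field] = row[idx]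
--                 else:
--                     item[field] = None
--             else:
--                 item[field] = None
--         result.append(item)
--
--     return result
-- ===== SOURCE B (Python) =====
-- def apply_mapping(mapping, headers, rows):
--     """Column-major re-implementation: resolve each field's column index once,
--     then fill one empty dict per row field-by-field."""
--     header_to_idx = {h: i for i, h in enumerate(headers)}
--     cols = [(field, header_to_idx.get(header) if header else None)
--             for field, header in mapping.items()]
--     result = [{} for _ in rows]
--     for field, idx in cols:
--         for d, row in zip(result, rows):
--             d[field] = row[idx] if idx is not None and idx < len(row) else None
--     return result
-- ===== Notes on version B (the rewrite author's own statement) =====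
-- stated objective: alternative
-- what changed: B hoists header resolution out of the per-row work (each field's column index is computed once, not once per row) and inverts the traversal to column-major: fields on the outer loop, rows on the inner loop, filling pre-allocated dicts.
import Mathlib
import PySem

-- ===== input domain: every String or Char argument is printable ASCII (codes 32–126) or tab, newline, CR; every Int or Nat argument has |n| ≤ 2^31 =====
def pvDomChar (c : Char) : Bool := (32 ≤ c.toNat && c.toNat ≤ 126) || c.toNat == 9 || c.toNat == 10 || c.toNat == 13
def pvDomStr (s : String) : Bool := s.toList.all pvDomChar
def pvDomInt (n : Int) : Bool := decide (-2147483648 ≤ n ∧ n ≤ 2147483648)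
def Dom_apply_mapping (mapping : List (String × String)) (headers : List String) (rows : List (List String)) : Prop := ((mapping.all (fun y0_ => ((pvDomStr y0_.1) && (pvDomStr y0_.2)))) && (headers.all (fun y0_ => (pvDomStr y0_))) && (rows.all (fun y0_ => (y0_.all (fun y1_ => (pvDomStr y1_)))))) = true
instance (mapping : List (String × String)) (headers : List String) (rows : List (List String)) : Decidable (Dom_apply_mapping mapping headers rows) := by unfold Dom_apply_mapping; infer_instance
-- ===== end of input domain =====

-- B hoists header→index resolution out of the per-row loop and fills the result column-major (fields outer, rows inner); same cost, different traversal.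


-- ===== PORT A =====
-- header_to_idx = {h: i for i, h in enumerate(headers)}  (shared line of both sources)
def pvHeaderIdx (headers : List String) : PySem.Dict String Int :=
  (PySem.List.enumerate headers).foldl (fun d ih => d.insert ih.2 ih.1) PySem.Dict.empty

def apply_mapping (mapping : List (String × String)) (headers : List String) (rows : List (List String)) : List (List (String × Option String)) :=
  let header_to_idx := pvHeaderIdx headers
  rows.map (fun row =>
    ((PySem.Dict.ofList mapping).items.foldl (fun item fh =>
      if fh.2 != "" && header_to_idx.contains fh.2 then
        let idx := header_to_idx.getD fh.2 0
        if idx < (row.length : Int) then item.insert fh.1 (some (PySem.List.pyGetD row idx ""))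
        else item.insert fh.1 (none : Option String)
      else item.insert fh.1 (none : Option String))
      (PySem.Dict.empty : PySem.Dict String (Option String))).items)

-- ===== PORT B =====
def apply_mapping_alt (mapping : List (String × String)) (headers : List String) (rows : List (List String)) : List (List (String × Option String)) :=
  let header_to_idx := pvHeaderIdx headers
  let cols := (PySem.Dict.ofList mapping).items.map (fun fh =>
    (fh.1, if fh.2 != "" then header_to_idx.get? fh.2 else none))
  (cols.foldl (fun result fc =>
      (result.zip rows).map (fun dr =>
        dr.1.insert fc.1 (match fc.2 with
          | some idx => if idx < (dr.2.length : Int) then some (PySem.List.pyGetD dr.2 idx "") else none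
          | none => (none : Option String))))
    (rows.map (fun _ => (PySem.Dict.empty : PySem.Dict String (Option String))))).map (·.items)

-- ===== PRECONDITION & SPEC =====
def Spec_apply_mapping (mapping : List (String × String)) (headers : List String) (rows : List (List String)) (out : List (List (String × Option String))) : Prop := out = apply_mapping_alt mapping headers rows
instance (mapping : List (String × String)) (headers : List String) (rows : List (List String)) (out : List (List (String × Option String))) : Decidable (Spec_apply_mapping mapping headers rows out) := by unfold Spec_apply_mapping; infer_instance

-- ===== CLAIM (what is proved, stated in full; the proofs are below) =====
def Claim_equal_apply_mapping : Prop := ∀ (mapping : List (String × String)) (headers : List String) (rows : List (List String)), Dom_apply_mapping mapping headers rows → Spec_apply_mapping mapping headers rows (apply_mapping mapping headers rows)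

-- ===== LEMMAS AND PROOFS =====

-- the column-major fold over a row-indexed accumulator is the row-major fold
theorem pv_colmajor {γ ρ δ : Type} (cols : List γ) (rows : List ρ) (F : ρ → δ)
    (step : δ → ρ → γ → δ) :
    cols.foldl (fun res c => (res.zip rows).map (fun dr => step dr.1 dr.2 c)) (rows.map F)
      = rows.map (fun r => cols.foldl (fun d c => step d r c) (F r)) := by
  induction cols generalizing F with
  | nil => simp
  | cons c cs ih =>
    simp only [List.foldl_cons]
    rw [← List.map_prod_right_eq_zip, List.map_map]
    exact ih (fun r => step (F r) r c)

-- A's per-field branch computes the same inserted value as B's resolved column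
theorem pv_step_eq (hidx : PySem.Dict String Int) (row : List String)
    (item : PySem.Dict String (Option String)) (fh : String × String) :
    (if fh.2 != "" && hidx.contains fh.2 then
        let idx := hidx.getD fh.2 0
        if idx < (row.length : Int) then item.insert fh.1 (some (PySem.List.pyGetD row idx ""))
        else item.insert fh.1 (none : Option String)
      else item.insert fh.1 (none : Option String))
    = item.insert fh.1 (match (if fh.2 != "" then hidx.get? fh.2 else none) with
        | some idx => if idx < (row.length : Int) then some (PySem.List.pyGetD row idx "") else none
        | none => (none : Option String)) := by
  by_cases h1 : fh.2 = ""
  · simp [h1]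
  · have h1' : (fh.2 != "") = true := by simp [h1]
    rw [h1']
    cases hg : hidx.get? fh.2 with
    | none =>
      have hc : hidx.contains fh.2 = false := by
        rw [PySem.Dict.contains_eq_isSome_get?, hg]; rfl
      simp [hc]
    | some i =>
      have hc : hidx.contains fh.2 = true := by
        rw [PySem.Dict.contains_eq_isSome_get?, hg]; rfl
      have hd : hidx.getD fh.2 0 = i := by
        rw [PySem.Dict.getD_eq_get?_getD, hg]; rfl
      simp only [hc, Bool.and_self, if_true, hd]
      split_ifs <;> rfl

-- ===== VERDICT (by name: the statement is the Claim_ definition above) =====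
theorem apply_mapping_spec : Claim_equal_apply_mapping := by
  intro mapping headers rows _
  unfold Spec_apply_mapping
  simp only [apply_mapping, apply_mapping_alt, List.foldl_map]
  rw [pv_colmajor ((PySem.Dict.ofList mapping).items) rows
        (fun _ => (PySem.Dict.empty : PySem.Dict String (Option String)))
        (fun d r y => d.insert y.1 (match (if y.2 != "" then (pvHeaderIdx headers).get? y.2 else none) with
          | some idx => if idx < (r.length : Int) then some (PySem.List.pyGetD r idx "") else none
          | none => (none : Option String))),
      List.map_map]
  apply List.map_congr_left
  intro row _
  simp only [Function.comp]
  congr 1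
  apply List.foldl_ext
  intro item fh _
  exact pv_step_eq (pvHeaderIdx headers) row item fh
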